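-- pv_equiv track=rewrite | github.com/wzygxr/shuati | class170_SqrtDecomposition/Code37_HDU4352_Python.py | get_new_status
-- ===== SOURCE A (Python) =====
-- def get_new_status(status, d):
--     """
--     根据当前状态和新数字，计算新的LIS状态
--
--     Args:
--         status: 当前状态（二进制压缩）
--         d: 新数字
--
--     Returns:
--         新状态
--     """
--     tmp = status
--     # 找到d应该插入的位置（替换第一个比d大的数字）
--     for i in range(d, 10):
--         if tmp & (1 << i):
--             tmp ^= (1 << i)
--             break
--     # 将d添加到状态中
--     tmp |= (1 << d)
--     return tmp
-- ===== SOURCE B (Python) =====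
-- def get_new_status(status, d):
--     """Bit-trick version: isolate the lowest set bit at positions d..9 with
--     two's-complement arithmetic instead of scanning bit by bit."""
--     high = status & (((1 << 10) - 1) & ~((1 << d) - 1))
--     if high:
--         status ^= high & -high
--     return status | (1 << d)
-- ===== Notes on version B (the rewrite author's own statement) =====
-- stated objective: idiomatic
-- what changed: Replaces the bit-by-bit scan for the first set bit at positions d..9 by a closed-form two's-complement lowest-set-bit isolation (high & -high) on the masked range.
import Mathlib
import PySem

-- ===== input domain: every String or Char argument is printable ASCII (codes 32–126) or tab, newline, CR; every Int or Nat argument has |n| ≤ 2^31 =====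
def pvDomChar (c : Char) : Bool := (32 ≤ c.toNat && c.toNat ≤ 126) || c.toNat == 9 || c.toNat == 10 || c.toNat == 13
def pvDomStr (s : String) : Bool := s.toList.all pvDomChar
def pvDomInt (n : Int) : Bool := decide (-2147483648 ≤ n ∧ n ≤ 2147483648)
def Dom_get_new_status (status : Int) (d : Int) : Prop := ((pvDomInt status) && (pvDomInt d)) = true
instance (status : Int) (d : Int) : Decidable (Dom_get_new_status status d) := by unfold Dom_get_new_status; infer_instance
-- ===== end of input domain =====

-- B replaces A's bit-by-bit scan for the first set bit at positions d..9 by the closed-form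
-- two's-complement lowest-set-bit isolation (high & -high) on the masked range (objective: idiomatic).

-- ===== PORT A =====
-- the 'for i in range(d, 10): if tmp & (1 << i): tmp ^= (1 << i); break' loop;
-- 'i.toNat' is exact because under Pre_ (0 ≤ d) every i produced by range(d, 10) is ≥ 0
def aLoop : List Int → Int → Int
  | [], tmp => tmp
  | i :: rest, tmp =>
    if PySem.Int.band tmp ((1 : Int) <<< i.toNat) ≠ 0 then
      PySem.Int.bxor tmp ((1 : Int) <<< i.toNat)   -- 'tmp ^= (1 << i)' then 'break'
    else aLoop rest tmp

def get_new_status (status : Int) (d : Int) : Int :=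
  -- tmp = status; loop; tmp |= (1 << d)  ('d.toNat' exact under Pre_: 0 ≤ d)
  PySem.Int.bor (aLoop (PySem.List.pyRange d 10 1) status) ((1 : Int) <<< d.toNat)

-- ===== PORT B =====
def get_new_status_alt (status : Int) (d : Int) : Int :=
  -- high = status & (((1 << 10) - 1) & ~((1 << d) - 1))   ('d.toNat' exact under Pre_: 0 ≤ d)
  let high := PySem.Int.band status (PySem.Int.band (((1 : Int) <<< (10 : Nat)) - 1) (Int.not (((1 : Int) <<< d.toNat) - 1)))
  -- if high: status ^= high & -high
  let status' := if high ≠ 0 then PySem.Int.bxor status (PySem.Int.band high (-high)) else status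
  -- return status | (1 << d)
  PySem.Int.bor status' ((1 : Int) <<< d.toNat)

-- ===== PRECONDITION & SPEC =====
-- Pre_ excludes d < 0, where both Pythons raise ValueError ('negative shift count') at '1 << d' / '1 << i'.
def Pre_get_new_status (status : Int) (d : Int) : Prop := 0 ≤ d
instance (status : Int) (d : Int) : Decidable (Pre_get_new_status status d) := by unfold Pre_get_new_status; infer_instance
def pvWitness_get_new_status : Int × Int := (37, 2)

def Spec_get_new_status (status : Int) (d : Int) (out : Int) : Prop := out = get_new_status_alt status d
instance (status : Int) (d : Int) (out : Int) : Decidable (Spec_get_new_status status d out) := by unfold Spec_get_new_status; infer_instance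

-- ===== CLAIM (what is proved, stated in full; the proofs are below) =====
def Claim_equal_get_new_status : Prop := ∀ (status : Int) (d : Int), Dom_get_new_status status d → Pre_get_new_status status d → Spec_get_new_status status d (get_new_status status d)

-- ===== LEMMAS AND PROOFS =====

-- disjoint naturals add like bitwise or
theorem pvAddDisj (a : ℕ) : ∀ b : ℕ, a &&& b = 0 → a + b = a ||| b := by
  induction a using Nat.binaryRec with
  | zero => simp
  | bit bA m ih =>
    intro b h
    cases b using Nat.binaryRec with
    | zero => simp
    | bit bB n =>
      rw [Nat.land_bit] at h
      obtain ⟨hn, hb⟩ := Nat.bit_eq_zero_iff.mp h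
      rw [Nat.lor_bit, Nat.bit_val, Nat.bit_val, Nat.bit_val]
      have hmn := ih n hn
      cases bA <;> cases bB <;> (try simp at hb) <;>
        simp only [Bool.or_self, Bool.false_or, Bool.or_false, Bool.toNat_false, Bool.toNat_true] <;> omega

-- testBit of the 10-bit complement
theorem pvTb1023 (r j : ℕ) (hr : r < 1024) :
    (1023 - r).testBit j = (decide (j < 10) && !r.testBit j) := by
  have : (1023 - r) = 2 ^ 10 - (r + 1) := by omega
  rw [this, Nat.testBit_two_pow_sub_succ hr]

theorem pvTbHigh (p j : ℕ) (hp : p < 1024) (hj : 10 ≤ j) : p.testBit j = false := by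
  apply Nat.testBit_lt_two_pow
  have : (2 : ℕ) ^ 10 ≤ 2 ^ j := Nat.pow_le_pow_right (by omega) hj
  omega

theorem pvTbSplit (q r : ℕ) (hr : r < 1024) (j : ℕ) :
    (1024 * q + r).testBit j = if j < 10 then r.testBit j else q.testBit (j - 10) := by
  have h : (1024 : ℕ) * q = 2 ^ 10 * q := by norm_num
  rw [h, Nat.testBit_two_pow_mul_add q hr j]

theorem pvN1 (q r p : ℕ) (hr : r < 1024) (hp : p < 1024) :
    (1024 * q + r) &&& p = r &&& p := by
  apply Nat.eq_of_testBit_eq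
  intro j
  rw [Nat.testBit_land, Nat.testBit_land, pvTbSplit q r hr j]
  by_cases hj : j < 10
  · simp [hj]
  · simp [hj, pvTbHigh p j hp (by omega)]

theorem pvN2 (q r p : ℕ) (hr : r < 1024) (hp : p < 1024) :
    (1024 * q + r) ^^^ p = 1024 * q + (r ^^^ p) := by
  have hx : r ^^^ p < 1024 := Nat.xor_lt_two_pow (n := 10) hr hp
  apply Nat.eq_of_testBit_eq
  intro j
  rw [Nat.testBit_xor, pvTbSplit q r hr j, pvTbSplit q _ hx j]
  by_cases hj : j < 10
  · simp [hj]
  · simp [hj, pvTbHigh p j hp (by omega)]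

theorem pvN3 (q r p : ℕ) (hr : r < 1024) (hp : p < 1024) :
    (1024 * q + r) ||| p = 1024 * q + (r ||| p) := by
  have hx : r ||| p < 1024 := Nat.or_lt_two_pow (n := 10) hr hp
  apply Nat.eq_of_testBit_eq
  intro j
  rw [Nat.testBit_lor, pvTbSplit q r hr j, pvTbSplit q _ hx j]
  by_cases hj : j < 10
  · simp [hj]
  · simp [hj, pvTbHigh p j hp (by omega)]

theorem pvN4 (r p : ℕ) (hr : r < 1024) (hp : p < 1024) :
    p - (p &&& (1023 - r)) = r &&& p := by
  have hdisj : (p &&& (1023 - r)) &&& (p &&& r) = 0 := by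
    apply Nat.eq_of_testBit_eq
    intro j
    rw [Nat.testBit_land, Nat.testBit_land, Nat.testBit_land, pvTb1023 r j hr, Nat.zero_testBit]
    by_cases h1 : r.testBit j <;> by_cases h2 : p.testBit j <;> simp [h1, h2]
  have hor : (p &&& (1023 - r)) ||| (p &&& r) = p := by
    apply Nat.eq_of_testBit_eq
    intro j
    rw [Nat.testBit_lor, Nat.testBit_land, Nat.testBit_land, pvTb1023 r j hr]
    by_cases hj : j < 10
    · by_cases h1 : r.testBit j <;> by_cases h2 : p.testBit j <;> simp [h1, h2, hj]
    · simp [pvTbHigh p j hp (by omega)]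
  have := pvAddDisj _ _ hdisj
  rw [hor] at this
  rw [Nat.land_comm r p]
  omega

theorem pvN5 (r p : ℕ) (hr : r < 1024) (hp : p < 1024) :
    (1023 - r) ^^^ p = 1023 - (r ^^^ p) := by
  have hx : r ^^^ p < 1024 := Nat.xor_lt_two_pow (n := 10) hr hp
  apply Nat.eq_of_testBit_eq
  intro j
  rw [Nat.testBit_xor, pvTb1023 r j hr, pvTb1023 _ j hx]
  by_cases hj : j < 10
  · simp only [hj, decide_true, Bool.true_and]
    by_cases h1 : r.testBit j <;> by_cases h2 : p.testBit j <;> simp [h1, h2]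
  · simp [hj, pvTbHigh p j hp (by omega)]

theorem pvNotEq (x : Int) : Int.not x = -x - 1 := by
  cases x with
  | ofNat n => show Int.negSucc n = _
               rw [Int.negSucc_eq, Int.ofNat_eq_natCast]; ring
  | negSucc n => show Int.ofNat n = _
                 rw [Int.negSucc_eq, Int.ofNat_eq_natCast]; ring

-- ===== Int-level split lemmas =====
theorem pvShift (n : ℕ) : ((1 : Int) <<< n) = ((2 ^ n : ℕ) : Int) := by
  simp [Int.shiftLeft_eq]

theorem pvN6 (r p : ℕ) (hr : r < 1024) (hp : p < 1024) :
    (1023 - r) &&& (1023 - p) = 1023 - (r ||| p) := by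
  have hx : r ||| p < 1024 := Nat.or_lt_two_pow (n := 10) hr hp
  apply Nat.eq_of_testBit_eq
  intro j
  rw [Nat.testBit_land, pvTb1023 r j hr, pvTb1023 p j hp, pvTb1023 _ j hx]
  by_cases hj : j < 10
  · simp only [hj, decide_true, Bool.true_and, Nat.testBit_lor]
    by_cases h1 : r.testBit j <;> by_cases h2 : p.testBit j <;> simp [h1, h2]
  · simp [hj]

theorem pvL1 (q r p : Int) (hr : 0 ≤ r) (hr' : r < 1024) (hp : 0 ≤ p) (hp' : p < 1024) :
    PySem.Int.band (1024 * q + r) p = PySem.Int.band r p := by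
  rw [PySem.Int.band_of_nonneg hr hp]
  by_cases hq : 0 ≤ q
  · have ha : (0 : Int) ≤ 1024 * q + r := by omega
    rw [PySem.Int.band_of_nonneg ha hp]
    have h1 : (1024 * q + r).toNat = 1024 * q.toNat + r.toNat := by omega
    rw [h1, pvN1 q.toNat r.toNat p.toNat (by omega) (by omega)]
  · have ha : ¬ (0 : Int) ≤ 1024 * q + r := by omega
    unfold PySem.Int.band
    rw [if_neg ha, if_pos hp]
    have h1 : (-(1024 * q + r) - 1).toNat = 1024 * (-q - 1).toNat + (1023 - r.toNat) := by omega
    rw [h1, Nat.land_comm p.toNat, pvN1 (-q - 1).toNat _ p.toNat (by omega) (by omega),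
        Nat.land_comm _ p.toNat, pvN4 r.toNat p.toNat (by omega) (by omega)]

theorem pvL2 (q r p : Int) (hr : 0 ≤ r) (hr' : r < 1024) (hp : 0 ≤ p) (hp' : p < 1024) :
    PySem.Int.bxor (1024 * q + r) p = 1024 * q + PySem.Int.bxor r p := by
  have hxlt : r.toNat ^^^ p.toNat < 1024 := Nat.xor_lt_two_pow (n := 10) (by omega) (by omega)
  rw [PySem.Int.bxor_of_nonneg hr hp]
  by_cases hq : 0 ≤ q
  · have ha : (0 : Int) ≤ 1024 * q + r := by omega
    rw [PySem.Int.bxor_of_nonneg ha hp]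
    have h1 : (1024 * q + r).toNat = 1024 * q.toNat + r.toNat := by omega
    rw [h1, pvN2 q.toNat r.toNat p.toNat (by omega) (by omega)]
    omega
  · have ha : ¬ (0 : Int) ≤ 1024 * q + r := by omega
    unfold PySem.Int.bxor
    rw [if_neg ha, if_pos hp]
    have h1 : (-(1024 * q + r) - 1).toNat = 1024 * (-q - 1).toNat + (1023 - r.toNat) := by omega
    rw [h1, pvN2 (-q - 1).toNat _ p.toNat (by omega) (by omega),
        pvN5 r.toNat p.toNat (by omega) (by omega)]
    omega

theorem pvL3 (q r p : Int) (hr : 0 ≤ r) (hr' : r < 1024) (hp : 0 ≤ p) (hp' : p < 1024) :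
    PySem.Int.bor (1024 * q + r) p = 1024 * q + PySem.Int.bor r p := by
  have holt : r.toNat ||| p.toNat < 1024 := Nat.or_lt_two_pow (n := 10) (by omega) (by omega)
  rw [PySem.Int.bor_of_nonneg hr hp]
  by_cases hq : 0 ≤ q
  · have ha : (0 : Int) ≤ 1024 * q + r := by omega
    rw [PySem.Int.bor_of_nonneg ha hp]
    have h1 : (1024 * q + r).toNat = 1024 * q.toNat + r.toNat := by omega
    rw [h1, pvN3 q.toNat r.toNat p.toNat (by omega) (by omega)]
    omega
  · have ha : ¬ (0 : Int) ≤ 1024 * q + r := by omega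
    unfold PySem.Int.bor
    rw [if_neg ha, if_pos hp]
    have h1 : (-(1024 * q + r) - 1).toNat = 1024 * (-q - 1).toNat + (1023 - r.toNat) := by omega
    have hand : (1023 - r.toNat) &&& p.toNat ≤ 1023 - r.toNat := Nat.and_le_left
    have h2 : (1023 - r.toNat) - ((1023 - r.toNat) &&& p.toNat) = 1023 - (r.toNat ||| p.toNat) := by
      have h4 := pvN4 (1023 - p.toNat) (1023 - r.toNat) (by omega) (by omega)
      have h5 : 1023 - (1023 - p.toNat) = p.toNat := by omega
      rw [h5] at h4
      rw [h4, Nat.land_comm, pvN6 r.toNat p.toNat (by omega) (by omega)]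
    rw [h1, pvN1 (-q - 1).toNat _ p.toNat (by omega) (by omega)]
    have h3 : 1024 * (-q - 1).toNat + (1023 - r.toNat) - ((1023 - r.toNat) &&& p.toNat)
        = 1024 * (-q - 1).toNat + (1023 - (r.toNat ||| p.toNat)) := by omega
    rw [h3]
    omega

theorem pvBandLeLeft (a b : Int) (ha : 0 ≤ a) :
    0 ≤ PySem.Int.band a b ∧ PySem.Int.band a b ≤ a := by
  unfold PySem.Int.band
  rw [if_pos ha]
  by_cases hb : 0 ≤ b
  · rw [if_pos hb]
    constructor
    · positivity
    · have : a.toNat &&& b.toNat ≤ a.toNat := Nat.and_le_left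
      omega
  · rw [if_neg hb]
    have : a.toNat - (a.toNat &&& (-b - 1).toNat) ≤ a.toNat := by omega
    omega

theorem pvBxorLt (a b : Int) (ha : 0 ≤ a) (ha' : a < 1024) (hb : 0 ≤ b) (hb' : b < 1024) :
    0 ≤ PySem.Int.bxor a b ∧ PySem.Int.bxor a b < 1024 := by
  unfold PySem.Int.bxor
  rw [if_pos ha, if_pos hb]
  have : a.toNat ^^^ b.toNat < 1024 :=
    Nat.xor_lt_two_pow (n := 10) (by omega) (by omega)
  omega

-- the mask ((1 << 10) - 1) & ~((1 << d) - 1), for any k : ℕ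
theorem pvMaskVal (k : ℕ) :
    PySem.Int.band (((1 : Int) <<< (10 : Nat)) - 1) (Int.not (((1 : Int) <<< k) - 1)) =
      ((1023 - (1023 &&& (2 ^ k - 1)) : ℕ) : Int) := by
  have h2k : (1 : ℕ) ≤ 2 ^ k := Nat.one_le_two_pow
  have hS : ((1 : Int) <<< k) = ((2 ^ k : ℕ) : Int) := pvShift k
  have hnot : Int.not (((1 : Int) <<< k) - 1) = -((2 ^ k : ℕ) : Int) := by
    rw [pvNotEq, hS]; ring
  have h10 : ((1 : Int) <<< (10 : Nat)) - 1 = (1023 : Int) := by decide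
  rw [h10, hnot]
  unfold PySem.Int.band
  have h1k : (1 : Int) ≤ ((2 ^ k : ℕ) : Int) := by exact_mod_cast Nat.one_le_two_pow
  have hb : ¬ (0 : Int) ≤ -((2 ^ k : ℕ) : Int) := by omega
  rw [if_pos (by norm_num : (0:Int) ≤ 1023), if_neg hb]
  congr 1
  have h1 : (1023 : Int).toNat = 1023 := rfl
  have h2 : (-(-((2 ^ k : ℕ) : Int)) - 1).toNat = 2 ^ k - 1 := by omega
  rw [h1, h2]

set_option maxRecDepth 100000 in
set_option maxHeartbeats 4000000 in
theorem pvLowEqFin : ∀ (x : Fin 1024) (y : Fin 10),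
    get_new_status ((x : ℕ) : Int) ((y : ℕ) : Int) = get_new_status_alt ((x : ℕ) : Int) ((y : ℕ) : Int) := by
  decide

-- A's whole computation splits off the high bits (d < 10)
theorem pvBitLt (i : Int) (hi : 0 ≤ i) (hi' : i < 10) :
    (0 : Int) ≤ (1 : Int) <<< i.toNat ∧ ((1 : Int) <<< i.toNat) < 1024 := by
  rw [pvShift]
  have h512 : (2 : ℕ) ^ i.toNat ≤ 2 ^ 9 := Nat.pow_le_pow_right (by omega) (by omega)
  norm_num at h512
  constructor
  · exact Int.natCast_nonneg _
  · omega

theorem pvALoopSplit (l : List Int) (hl : ∀ i ∈ l, 0 ≤ i ∧ i < 10) (q r : Int)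
    (hr : 0 ≤ r) (hr' : r < 1024) :
    aLoop l (1024 * q + r) = 1024 * q + aLoop l r ∧ 0 ≤ aLoop l r ∧ aLoop l r < 1024 := by
  induction l with
  | nil => exact ⟨rfl, hr, hr'⟩
  | cons i rest ih =>
    obtain ⟨hi0, hi9⟩ := hl i List.mem_cons_self
    obtain ⟨hp0, hp9⟩ := pvBitLt i hi0 hi9
    simp only [aLoop]
    rw [pvL1 q r _ hr hr' hp0 hp9]
    by_cases hc : PySem.Int.band r ((1 : Int) <<< i.toNat) ≠ 0
    · rw [if_pos hc, if_pos hc]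
      obtain ⟨hx0, hx9⟩ := pvBxorLt r _ hr hr' hp0 hp9
      exact ⟨pvL2 q r _ hr hr' hp0 hp9, hx0, hx9⟩
    · rw [if_neg hc, if_neg hc]
      exact ih (fun j hj => hl j (List.mem_cons_of_mem i hj))

theorem pvASplit (q r d : Int) (hr : 0 ≤ r) (hr' : r < 1024) (hd : 0 ≤ d) (hd' : d < 10) :
    get_new_status (1024 * q + r) d = 1024 * q + get_new_status r d := by
  have hl : ∀ i ∈ PySem.List.pyRange d 10 1, 0 ≤ i ∧ i < 10 := by
    intro i hi
    have := PySem.List.mem_pyRange_one.mp hi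
    omega
  obtain ⟨hsplit, h0, h9⟩ := pvALoopSplit (PySem.List.pyRange d 10 1) hl q r hr hr'
  obtain ⟨hd0, hd9⟩ := pvBitLt d hd hd'
  unfold get_new_status
  rw [hsplit, pvL3 q _ _ h0 h9 hd0 hd9]

theorem pvBSplit (q r d : Int) (hr : 0 ≤ r) (hr' : r < 1024) (hd : 0 ≤ d) (hd' : d < 10) :
    get_new_status_alt (1024 * q + r) d = 1024 * q + get_new_status_alt r d := by
  obtain ⟨hd0, hd9⟩ := pvBitLt d hd hd'
  have hmle : (1023 : ℕ) &&& (2 ^ d.toNat - 1) ≤ 1023 := Nat.and_le_left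
  have hm0 : (0 : Int) ≤ ((1023 - (1023 &&& (2 ^ d.toNat - 1)) : ℕ) : Int) := by positivity
  have hm9 : ((1023 - (1023 &&& (2 ^ d.toNat - 1)) : ℕ) : Int) < 1024 := by
    push_cast [Nat.cast_sub hmle]; omega
  unfold get_new_status_alt
  rw [pvMaskVal d.toNat, pvL1 q r _ hr hr' hm0 hm9]
  by_cases hc : PySem.Int.band r ((1023 - (1023 &&& (2 ^ d.toNat - 1)) : ℕ) : Int) ≠ 0
  · simp only [if_pos hc]
    obtain ⟨hh0, hhle⟩ := pvBandLeLeft r _ hr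
    obtain ⟨hl0, hlle⟩ := pvBandLeLeft (PySem.Int.band r _) (-(PySem.Int.band r _)) hh0
    rw [pvL2 q r _ hr hr' hl0 (by omega)]
    obtain ⟨hx0, hx9⟩ := pvBxorLt r _ hr hr' hl0 (by omega)
    rw [pvL3 q _ _ hx0 hx9 hd0 hd9]
  · simp only [if_neg hc]
    rw [pvL3 q r _ hr hr' hd0 hd9]

-- ===== VERDICT (by name: the statement is the Claim_ definition above) =====
theorem get_new_status_spec : Claim_equal_get_new_status := by
  intro status d _ hPre
  unfold Pre_get_new_status at hPre
  unfold Spec_get_new_status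
  by_cases hd : d < 10
  · -- low digit: split status into 1024*q + r and finish by the finite check
    have hsd : 1024 * (status / 1024) + status % 1024 = status := Int.mul_ediv_add_emod status 1024
    have hr : 0 ≤ status % 1024 := Int.emod_nonneg status (by norm_num)
    have hr' : status % 1024 < 1024 := Int.emod_lt_of_pos status (by norm_num)
    have hA := pvASplit (status / 1024) (status % 1024) d hr hr' hPre hd
    have hB := pvBSplit (status / 1024) (status % 1024) d hr hr' hPre hd
    rw [hsd] at hA hB
    rw [hA, hB]
    have hx : ((status % 1024).toNat : Int) = status % 1024 := Int.toNat_of_nonneg hr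
    have hy : ((d.toNat : ℕ) : Int) = d := Int.toNat_of_nonneg hPre
    have := pvLowEqFin ⟨(status % 1024).toNat, by omega⟩ ⟨d.toNat, by omega⟩
    simp only [hx, hy] at this
    rw [this]
  · -- d ≥ 10: the loop range is empty and the mask is zero
    have hrange : PySem.List.pyRange d 10 1 = [] := by
      apply List.eq_nil_iff_forall_not_mem.mpr
      intro x hx
      have := PySem.List.mem_pyRange_one.mp hx
      omega
    have hk : 10 ≤ d.toNat := by omega
    have hmask : (1023 : ℕ) &&& (2 ^ d.toNat - 1) = 1023 := by
      rw [Nat.and_two_pow_sub_one_eq_mod]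
      apply Nat.mod_eq_of_lt
      have : (2 : ℕ) ^ 10 ≤ 2 ^ d.toNat := Nat.pow_le_pow_right (by omega) hk
      omega
    unfold get_new_status get_new_status_alt
    rw [hrange, pvMaskVal d.toNat, hmask]
    norm_num [aLoop, PySem.Int.band_zero]
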